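-- pv_equiv track=rewrite | github.com/leslierere/leetcode_with_python | not_in_lc/amazon/HowManySwap.py | countSwap
-- ===== SOURCE A (Python) =====
-- def countSwap(array):
--     times = 0
--
--     for i in range(1, len(array)):
--         for j in range(i):
--             if array[i] < array[j]:
--                 array[i], array[j] = array[j], array[i]
--                 times += 1
--
--     return times
-- ===== SOURCE B (Python) =====
-- def countSwap(array):
--     # Simpler one-pass reformulation: A's swap count equals, for each element,
--     # the number of distinct earlier values greater than it.
--     # (Unlike A, this does not mutate `array` in place.)
--     times = 0
--     seen = set()
--     for x in array:
--         times += sum(1 for v in seen if v > x)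
--         seen.add(x)
--     return times
-- ===== Notes on version B (the rewrite author's own statement) =====
-- stated objective: simpler
-- what changed: Replaces the nested index loops with in-place conditional swaps by a single left-to-right pass that keeps a set of values seen so far and adds, per element, the count of distinct earlier values greater than it (A mutates the array in place, B does not).
import Mathlib
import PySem

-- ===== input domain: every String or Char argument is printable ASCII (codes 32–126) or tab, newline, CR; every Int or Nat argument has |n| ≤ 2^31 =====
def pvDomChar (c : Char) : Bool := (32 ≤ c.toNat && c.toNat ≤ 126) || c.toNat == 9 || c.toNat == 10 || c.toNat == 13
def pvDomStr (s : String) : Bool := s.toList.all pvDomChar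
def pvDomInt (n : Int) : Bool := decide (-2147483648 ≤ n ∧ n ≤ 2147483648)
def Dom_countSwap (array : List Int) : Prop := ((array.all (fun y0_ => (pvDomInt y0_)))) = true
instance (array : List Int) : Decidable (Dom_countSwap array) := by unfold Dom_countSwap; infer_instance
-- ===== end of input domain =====

-- B replaces A's nested swap loops by one pass over the list with a set of already-seen
-- values, counting distinct earlier values greater than each element (simpler; return
-- value only: A sorts `array` in place, B does not mutate it).

-- ===== PORT A =====
-- indices produced by the ranges are always in bounds, so the defaulted get/set
-- (pyGetD/pySetD) agree with Python's array[i] here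
def pySwapInner (i : Int) (st : List Int × Int) (j : Int) : List Int × Int :=
  let ai := PySem.List.pyGetD st.1 i 0
  let aj := PySem.List.pyGetD st.1 j 0
  if ai < aj then
    (PySem.List.pySetD (PySem.List.pySetD st.1 i aj) j ai, st.2 + 1)
  else st

def countSwap (array : List Int) : Int :=
  ((PySem.List.pyRange 1 (PySem.List.len array) 1).foldl
    (fun st i => (PySem.List.pyRange 0 i 1).foldl (pySwapInner i) st)
    (array, 0)).2

-- ===== PORT B =====
def countSwap_alt (array : List Int) : Int :=
  (array.foldl
    (fun (st : PySem.Set Int × Int) x =>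
      (PySem.Set.add st.1 x,
       st.2 + (st.1.map (fun v => if x < v then (1 : Int) else 0)).sum))
    (PySem.Set.empty, 0)).2

-- ===== PRECONDITION & SPEC =====
def Spec_countSwap (array : List Int) (out : Int) : Prop := out = countSwap_alt array
instance (array : List Int) (out : Int) : Decidable (Spec_countSwap array out) := by unfold Spec_countSwap; infer_instance

-- ===== CLAIM (what is proved, stated in full; the proofs are below) =====
def Claim_equal_countSwap : Prop := ∀ (array : List Int), Dom_countSwap array → Spec_countSwap array (countSwap array)

-- ===== LEMMAS AND PROOFS =====

def F : List Int → Int → List Int × Int × Int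
  | [], v => ([], v, 0)
  | a :: s, v =>
    if v < a then
      let r := F s a
      (v :: r.1, r.2.1, r.2.2 + 1)
    else
      let r := F s v
      (a :: r.1, r.2.1, r.2.2)
theorem getAt (q : List Int) (y : Int) (v : List Int) (d : Int) :
    PySem.List.pyGetD (q ++ y :: v) ((q.length : Int)) d = y := by
  simp [PySem.List.pyGetD_natCast, List.getD_eq_getElem?_getD]
theorem setAt (q : List Int) (y : Int) (v : List Int) (z : Int) :
    PySem.List.pySetD (q ++ y :: v) ((q.length : Int)) z = q ++ z :: v := by
  simp [PySem.List.pySetD_natCast]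
theorem F_length (p : List Int) (x : Int) : (F p x).1.length = p.length := by
  induction p generalizing x with
  | nil => simp [F]
  | cons a s ih => simp only [F]; split <;> simp [ih]
theorem inner_lemma (p : List Int) : ∀ (q : List Int) (x : Int) (r : List Int) (t : Int),
    (PySem.List.pyRange (q.length : Int) ((q.length : Int) + (p.length : Int)) 1).foldl
      (pySwapInner ((q.length : Int) + (p.length : Int))) (q ++ (p ++ x :: r), t)
    = (q ++ ((F p x).1 ++ (F p x).2.1 :: r), t + (F p x).2.2) := by
  induction p with
  | nil =>
    intro q x r t
    simp [PySem.List.pyRange_one_eq_nil, F]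
  | cons a s ih =>
    intro q x r t
    rw [PySem.List.pyRange_one_cons (by simp only [List.length_cons]; push_cast; omega)]
    rw [List.foldl_cons]
    have hx : PySem.List.pyGetD (q ++ (a :: s ++ x :: r)) ((q.length : Int) + ((a :: s).length : Int)) 0 = x := by
      have := getAt (q ++ a :: s) x r 0
      simpa [List.append_assoc, List.length_append, Int.natCast_add] using this
    have ha : PySem.List.pyGetD (q ++ (a :: s ++ x :: r)) ((q.length : Int)) 0 = a := by
      simpa using getAt q a (s ++ x :: r) 0
    simp only [pySwapInner, hx, ha]
    by_cases hlt : x < a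
    · simp only [if_pos hlt]
      -- set position I (index of x) to a, then position q.length to x
      have hset1 : PySem.List.pySetD (q ++ (a :: s ++ x :: r)) ((q.length : Int) + ((a :: s).length : Int)) a
          = q ++ (a :: s ++ a :: r) := by
        have := setAt (q ++ a :: s) x r a
        simpa [List.append_assoc, List.length_append, Int.natCast_add] using this
      have hset2 : PySem.List.pySetD (q ++ (a :: s ++ a :: r)) ((q.length : Int)) x
          = q ++ (x :: s ++ a :: r) := by
        simpa using setAt q a (s ++ a :: r) x
      rw [hset1, hset2]
      have hq' : ((q ++ [x]).length : Int) = (q.length : Int) + 1 := by simp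
      have := ih (q ++ [x]) a r (t + 1)
      rw [hq'] at this
      simp only [List.append_assoc, List.cons_append, List.nil_append, List.length_cons] at this ⊢
      push_cast at this ⊢
      rw [show (q.length : Int) + ((s.length : Int) + 1) = (q.length : Int) + 1 + (s.length : Int) by omega]
      rw [this]
      simp only [F, if_pos hlt, List.cons_append]
      rw [Prod.mk.injEq]
      exact ⟨rfl, by omega⟩
    · simp only [if_neg hlt]
      have hq' : ((q ++ [a]).length : Int) = (q.length : Int) + 1 := by simp
      have := ih (q ++ [a]) x r t
      rw [hq'] at this
      simp only [List.append_assoc, List.cons_append, List.nil_append, List.length_cons] at this ⊢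
      push_cast at this ⊢
      rw [show (q.length : Int) + ((s.length : Int) + 1) = (q.length : Int) + 1 + (s.length : Int) by omega]
      rw [this]
      simp only [F, if_neg hlt, List.cons_append]
def runStep (st : List Int × Int) (x : Int) : List Int × Int :=
  ((F st.1 x).1 ++ [(F st.1 x).2.1], st.2 + (F st.1 x).2.2)

def run (l : List Int) : List Int × Int := l.foldl runStep ([], 0)

theorem run_length (l : List Int) : (run l).1.length = l.length := by
  suffices h : ∀ (l : List Int) (st : List Int × Int),
      (l.foldl runStep st).1.length = st.1.length + l.length by
    simpa using h l ([], 0)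
  intro l
  induction l with
  | nil => simp
  | cons a s ih => intro st; simp [runStep, ih, F_length]; omega

theorem run_append (l : List Int) (x : Int) : run (l ++ [x]) = runStep (run l) x := by
  simp [run, List.foldl_append]

theorem outer_lemma (array : List Int) : ∀ (k : Nat), 1 ≤ k → k ≤ array.length →
    (PySem.List.pyRange 1 (k : Int) 1).foldl
      (fun st i => (PySem.List.pyRange 0 i 1).foldl (pySwapInner i) st)
      (array, 0)
    = ((run (array.take k)).1 ++ array.drop k, (run (array.take k)).2) := by
  intro k
  induction k with
  | zero => omega
  | succ k ih =>
    intro _ hk1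
    by_cases hk : 1 ≤ k
    · -- inductive step: k ≥ 1, k+1 ≤ length, so k < length
      have hklen : k < array.length := by omega
      rw [show ((k + 1 : Nat) : Int) = (k : Int) + 1 by push_cast; ring]
      rw [PySem.List.pyRange_one_succ_right (by exact_mod_cast Nat.one_le_iff_ne_zero.mpr (by omega))]
      rw [List.foldl_append, ih hk (by omega), List.foldl_cons, List.foldl_nil]
      have hdrop : array.drop k = array[k] :: array.drop (k + 1) :=
        (List.drop_eq_getElem_cons hklen)
      have hlen : (run (array.take k)).1.length = k := by
        rw [run_length]; simp [Nat.min_eq_left (le_of_lt hklen)]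
      have hinner := inner_lemma (run (array.take k)).1 [] (array[k]) (array.drop (k+1)) ((run (array.take k)).2)
      simp only [List.nil_append, List.length_nil, Nat.cast_zero, zero_add] at hinner
      rw [hlen] at hinner
      rw [hdrop]
      rw [hinner]
      have htake : array.take (k+1) = array.take k ++ [array[k]] := by
        rw [List.take_add_one]
        simp [List.getElem?_eq_getElem hklen]
      rw [htake, run_append]
      simp [runStep]
    · -- base: k = 0, so k+1 = 1
      have hk0 : k = 0 := by omega
      subst hk0
      rw [show ((0 + 1 : Nat) : Int) = 1 by norm_num, PySem.List.pyRange_one_eq_nil le_rfl, List.foldl_nil]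
      obtain ⟨y, ys, rfl⟩ : ∃ y ys, array = y :: ys := by
        cases array with
        | nil => simp at hk1
        | cons y ys => exact ⟨y, ys, rfl⟩
      simp [run, runStep, F]
theorem F_props (p : List Int) : ∀ (x : Int), p.Pairwise (· ≤ ·) →
    ((F p x).1 ++ [(F p x).2.1]).Pairwise (· ≤ ·) ∧
    ((F p x).1 ++ [(F p x).2.1]).Perm (x :: p) ∧
    (F p x).2.2 = ((p.toFinset.filter (fun v => x < v)).card : Int) := by
  induction p with
  | nil => intro x _; simp [F]
  | cons a s ih =>
    intro x hp
    rw [List.pairwise_cons] at hp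
    obtain ⟨ha, hs⟩ := hp
    by_cases hlt : x < a
    · obtain ⟨ihS, ihP, ihC⟩ := ih a hs
      simp only [F, if_pos hlt]
      refine ⟨?_, ?_, ?_⟩
      · rw [List.cons_append, List.pairwise_cons]
        refine ⟨?_, ihS⟩
        intro y hy
        rcases List.mem_cons.mp ((ihP.mem_iff).mp hy) with h | h
        · omega
        · have := ha y h; omega
      · rw [List.cons_append]
        exact ihP.cons x
      · -- count: card over insert a S with everything in s greater than x
        have hS : s.toFinset.filter (fun v => x < v) = s.toFinset := by
          apply Finset.filter_true_of_mem
          intro v hv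
          have := ha v (List.mem_toFinset.mp hv); omega
        have hEr : s.toFinset.filter (fun v => a < v) = s.toFinset.erase a := by
          ext v
          simp only [Finset.mem_filter, Finset.mem_erase]
          constructor
          · rintro ⟨hv, hav⟩; exact ⟨by omega, hv⟩
          · rintro ⟨hne, hv⟩
            have := ha v (List.mem_toFinset.mp hv)
            exact ⟨hv, by omega⟩
        rw [ihC]
        simp only [List.toFinset_cons]
        rw [Finset.filter_insert, if_pos hlt, hS, hEr]
        by_cases haS : a ∈ s.toFinset
        · rw [Finset.insert_eq_self.mpr haS]
          rw [Finset.card_erase_of_mem haS]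
          have : 1 ≤ s.toFinset.card := Finset.card_pos.mpr ⟨a, haS⟩
          omega
        · rw [Finset.erase_eq_of_notMem haS, Finset.card_insert_of_notMem haS]
          push_cast; ring
    · obtain ⟨ihS, ihP, ihC⟩ := ih x hs
      simp only [F, if_neg hlt]
      refine ⟨?_, ?_, ?_⟩
      · rw [List.cons_append, List.pairwise_cons]
        refine ⟨?_, ihS⟩
        intro y hy
        rcases List.mem_cons.mp ((ihP.mem_iff).mp hy) with h | h
        · omega
        · exact ha y h
      · rw [List.cons_append]
        exact (ihP.cons a).trans (List.Perm.swap x a s)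
      · rw [ihC]
        simp only [List.toFinset_cons]
        rw [Finset.filter_insert, if_neg hlt]

theorem sum_indicator (s : List Int) (x : Int) (hs : s.Nodup) :
    (s.map (fun v => if x < v then (1 : Int) else 0)).sum
    = ((s.toFinset.filter (fun v => x < v)).card : Int) := by
  induction s with
  | nil => simp
  | cons a s ih =>
    rw [List.nodup_cons] at hs
    obtain ⟨has, hs⟩ := hs
    simp only [List.map_cons, List.sum_cons, List.toFinset_cons, Finset.filter_insert]
    rw [ih hs]
    by_cases hlt : x < a
    · rw [if_pos hlt, if_pos hlt,
        Finset.card_insert_of_notMem (by simp [has, Finset.mem_filter])]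
      push_cast; ring
    · rw [if_neg hlt, if_neg hlt]; ring

theorem bfold_fst (l : List Int) : ∀ (s : PySem.Set Int) (t : Int),
    (l.foldl (fun (st : PySem.Set Int × Int) x =>
      (PySem.Set.add st.1 x,
       st.2 + (st.1.map (fun v => if x < v then (1 : Int) else 0)).sum)) (s, t)).1
    = l.foldl PySem.Set.add s := by
  induction l with
  | nil => intro s t; rfl
  | cons a l ih => intro s t; simp only [List.foldl_cons]; exact ih _ _

theorem main_lemma (l : List Int) :
    (run l).1.Pairwise (· ≤ ·) ∧ (run l).1.Perm l ∧
    (run l).2 = (l.foldl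
      (fun (st : PySem.Set Int × Int) x =>
        (PySem.Set.add st.1 x,
         st.2 + (st.1.map (fun v => if x < v then (1 : Int) else 0)).sum))
      (PySem.Set.empty, 0)).2 := by
  induction l using List.reverseRecOn with
  | nil => simp [run]
  | append_singleton l x ih =>
    obtain ⟨ihS, ihP, ihC⟩ := ih
    obtain ⟨hS, hP, hC⟩ := F_props (run l).1 x ihS
    rw [run_append]
    refine ⟨hS, ?_, ?_⟩
    · exact hP.trans ((ihP.cons x).trans (List.perm_append_singleton x l).symm)
    · simp only [runStep, List.foldl_append, List.foldl_cons, List.foldl_nil]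
      rw [ihC, hC]
      have hset : l.foldl PySem.Set.add PySem.Set.empty = PySem.Set.ofList l := by
        rw [PySem.Set.ofList_eq_foldl]; rfl
      rw [bfold_fst, hset]
      have hfs : (run l).1.toFinset = (PySem.Set.ofList l).toFinset := by
        ext v
        simp [PySem.Set.mem_ofList, ihP.mem_iff]
      rw [sum_indicator _ _ (PySem.Set.nodup_ofList l), hfs]

-- ===== VERDICT (by name: the statement is the Claim_ definition above) =====
theorem countSwap_spec : Claim_equal_countSwap := by
  intro array _
  show countSwap array = countSwap_alt array
  cases array with
  | nil => rfl
  | cons y ys =>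
    have h := outer_lemma (y :: ys) (y :: ys).length (by simp) le_rfl
    unfold countSwap
    rw [PySem.List.len_eq, h]
    simp only [List.take_length]
    exact (main_lemma (y :: ys)).2.2
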